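-- pv_equiv track=rewrite | github.com/aas008/hr-screening-agent | src/agents/resume_analyzer.py | _estimate_from_seniority_indicators
-- ===== SOURCE A (Python) =====
-- def _estimate_from_seniority_indicators(resume_text: str) -> int:
--     """Estimate experience from seniority indicators"""
--
--     seniority_indicators = {
--         'senior': 5,
--         'lead': 6,
--         'principal': 8,
--         'staff': 7,
--         'architect': 8,
--         'manager': 6,
--         'director': 10,
--         'team lead': 5,
--         'tech lead': 6,
--         'junior': 1,
--         'intern': 0,
--         'entry': 0,
--         'graduate': 0
--     }
--
--     max_experience = 0
--
--     for indicator, years in seniority_indicators.items():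
--         if indicator in resume_text:
--             max_experience = max(max_experience, years)
--
--     return max_experience
-- ===== SOURCE B (Python) =====
-- def _estimate_from_seniority_indicators(resume_text: str) -> int:
--     """Estimate experience from seniority indicators"""
--
--     # indicators pre-ordered by years, highest first: return the first match
--     priority = [
--         ('director', 10),
--         ('principal', 8),
--         ('architect', 8),
--         ('staff', 7),
--         ('lead', 6),
--         ('manager', 6),
--         ('tech lead', 6),
--         ('senior', 5),
--         ('team lead', 5),
--         ('junior', 1),
--         ('intern', 0),
--         ('entry', 0),
--         ('graduate', 0),
--     ]
--     for indicator, years in priority: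
--         if indicator in resume_text:
--             return years
--     return 0
-- ===== Notes on version B (the rewrite author's own statement) =====
-- stated objective: alternative
-- what changed: B replaces A's accumulate-max fold over a dict of indicators with a priority-ordered list (years descending) scanned with an early return on the first matching indicator; the 0-default falls out of the exhausted scan.
import Mathlib
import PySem

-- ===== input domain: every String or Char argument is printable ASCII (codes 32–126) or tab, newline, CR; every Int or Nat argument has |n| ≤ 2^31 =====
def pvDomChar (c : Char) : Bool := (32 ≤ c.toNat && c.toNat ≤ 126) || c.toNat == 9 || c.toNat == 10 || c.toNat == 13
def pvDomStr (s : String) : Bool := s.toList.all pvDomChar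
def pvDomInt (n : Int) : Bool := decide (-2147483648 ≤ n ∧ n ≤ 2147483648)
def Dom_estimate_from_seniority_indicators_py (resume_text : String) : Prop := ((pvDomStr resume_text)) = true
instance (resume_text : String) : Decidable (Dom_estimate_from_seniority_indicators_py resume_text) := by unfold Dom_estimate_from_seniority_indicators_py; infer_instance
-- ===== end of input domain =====

-- B replaces A's accumulate-max fold over all indicators with a priority-ordered
-- (years-descending) list scanned with an early return on the first match.
-- ===== PORT A =====
def estimate_from_seniority_indicators_py (resume_text : String) : Int :=
  ([("senior", 5), ("lead", 6), ("principal", 8), ("staff", 7), ("architect", 8),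
    ("manager", 6), ("director", 10), ("team lead", 5), ("tech lead", 6),
    ("junior", 1), ("intern", 0), ("entry", 0), ("graduate", 0)] : List (String × Int)).foldl
    (fun max_experience p =>
      if PySem.Str.isIn p.1 resume_text then max max_experience p.2 else max_experience) 0

-- ===== PORT B =====
-- scan the priority list, returning the years of the first indicator found in the text
def pvFirstMatch (resume_text : String) : List (String × Int) → Int
  | [] => 0
  | (indicator, years) :: rest =>
      if PySem.Str.isIn indicator resume_text then years else pvFirstMatch resume_text rest

def estimate_from_seniority_indicators_py_alt (resume_text : String) : Int :=
  pvFirstMatch resume_text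
    [("director", 10), ("principal", 8), ("architect", 8), ("staff", 7), ("lead", 6),
     ("manager", 6), ("tech lead", 6), ("senior", 5), ("team lead", 5),
     ("junior", 1), ("intern", 0), ("entry", 0), ("graduate", 0)]

-- ===== PRECONDITION & SPEC =====
def Spec_estimate_from_seniority_indicators_py (resume_text : String) (out : Int) : Prop := out = estimate_from_seniority_indicators_py_alt resume_text
instance (resume_text : String) (out : Int) : Decidable (Spec_estimate_from_seniority_indicators_py resume_text out) := by unfold Spec_estimate_from_seniority_indicators_py; infer_instance

-- ===== CLAIM (what is proved, stated in full; the proofs are below) =====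
def Claim_equal_estimate_from_seniority_indicators_py : Prop := ∀ (resume_text : String), Dom_estimate_from_seniority_indicators_py resume_text → Spec_estimate_from_seniority_indicators_py resume_text (estimate_from_seniority_indicators_py resume_text)

-- ===== LEMMAS AND PROOFS =====

-- proof helpers: both ports as functions of the 13 substring-test booleans
def pvA13 (b1 b2 b3 b4 b5 b6 b7 b8 b9 b10 b11 b12 b13 : Bool) : Int :=
  let a1 : Int := if b1 then max 0 5 else 0
  let a2 := if b2 then max a1 6 else a1
  let a3 := if b3 then max a2 8 else a2
  let a4 := if b4 then max a3 7 else a3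
  let a5 := if b5 then max a4 8 else a4
  let a6 := if b6 then max a5 6 else a5
  let a7 := if b7 then max a6 10 else a6
  let a8 := if b8 then max a7 5 else a7
  let a9 := if b9 then max a8 6 else a8
  let a10 := if b10 then max a9 1 else a9
  let a11 := if b11 then max a10 0 else a10
  let a12 := if b12 then max a11 0 else a11
  if b13 then max a12 0 else a12

def pvB13 (b1 b2 b3 b4 b5 b6 b7 b8 b9 b10 b11 b12 b13 : Bool) : Int :=
  if b7 then 10 else if b3 then 8 else if b5 then 8 else if b4 then 7
  else if b2 then 6 else if b6 then 6 else if b9 then 6 else if b1 then 5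
  else if b8 then 5 else if b10 then 1 else if b11 then 0 else if b12 then 0
  else if b13 then 0 else 0

theorem pv13_eq : ∀ b1 b2 b3 b4 b5 b6 b7 b8 b9 b10 b11 b12 b13 : Bool,
    pvA13 b1 b2 b3 b4 b5 b6 b7 b8 b9 b10 b11 b12 b13
      = pvB13 b1 b2 b3 b4 b5 b6 b7 b8 b9 b10 b11 b12 b13 := by decide

theorem pv_bridge (t : String) :
    estimate_from_seniority_indicators_py t = estimate_from_seniority_indicators_py_alt t := by
  exact pv13_eq (PySem.Str.isIn "senior" t) (PySem.Str.isIn "lead" t)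
    (PySem.Str.isIn "principal" t) (PySem.Str.isIn "staff" t) (PySem.Str.isIn "architect" t)
    (PySem.Str.isIn "manager" t) (PySem.Str.isIn "director" t) (PySem.Str.isIn "team lead" t)
    (PySem.Str.isIn "tech lead" t) (PySem.Str.isIn "junior" t) (PySem.Str.isIn "intern" t)
    (PySem.Str.isIn "entry" t) (PySem.Str.isIn "graduate" t)

-- ===== VERDICT (by name: the statement is the Claim_ definition above) =====
theorem estimate_from_seniority_indicators_py_spec : Claim_equal_estimate_from_seniority_indicators_py := by
  intro t _
  exact pv_bridge t
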